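-- pv_equiv track=rewrite | github.com/hoeeg/AdventOfCode2024 | DAY9/Disk_Fragmenter.py | find_free_spans
-- ===== SOURCE A (Python) =====
-- def find_free_spans(blocks):
--     """
--     Find spans of contiguous free spaces in the disk
--     """
--     spans = []
--     start = None
--
--     for i, block in enumerate(blocks):
--         if block == ".":
--             if start is None:
--                 start = i
--         elif start is not None:
--             spans.append((start, i - 1))
--             start = None
--
--     if start is not None:
--         spans.append((start, len(blocks) - 1))
--
--     return spans
-- ===== SOURCE B (Python) =====
-- def find_free_spans(blocks):
--     """
--     Find spans of contiguous free spaces in the disk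
--     """
--     spans = []
--     i, n = 0, len(blocks)
--     while i < n:
--         free = blocks[i] == "."
--         j = i + 1
--         while j < n and (blocks[j] == ".") == free:
--             j += 1
--         if free:
--             spans.append((i, j - 1))
--         i = j
--     return spans
-- ===== Notes on version B (the rewrite author's own statement) =====
-- stated objective: alternative
-- what changed: A scans element by element carrying an Optional start sentinel with a post-loop flush; B chunks the list into maximal same-key runs with a two-pointer inner scan and emits each free run directly, with no sentinel and no tail special case.
import Mathlib
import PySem

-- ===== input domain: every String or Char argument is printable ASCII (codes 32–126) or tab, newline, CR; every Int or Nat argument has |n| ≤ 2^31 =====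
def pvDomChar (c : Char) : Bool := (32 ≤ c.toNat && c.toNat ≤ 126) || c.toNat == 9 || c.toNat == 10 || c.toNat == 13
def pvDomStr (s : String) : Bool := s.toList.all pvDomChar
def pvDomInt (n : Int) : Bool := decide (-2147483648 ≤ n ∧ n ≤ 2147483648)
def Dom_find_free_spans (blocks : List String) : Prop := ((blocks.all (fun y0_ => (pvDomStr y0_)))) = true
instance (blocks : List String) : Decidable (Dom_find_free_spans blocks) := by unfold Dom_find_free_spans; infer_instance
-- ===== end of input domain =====

-- B replaces A's element-by-element scan with an Optional start sentinel by a run-chunking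
-- two-pointer scan that emits each maximal free run directly (alternative decomposition, same cost).

-- ===== PORT A =====
-- A's for-loop over enumerate(blocks) with state (start, spans); after the loop, if start
-- is set, the final span ends at len(blocks)-1, i.e. the carried index i minus 1.
def goA : List String → Int → Option Int → List (Int × Int) → List (Int × Int)
  | [], i, start, spans =>
    match start with
    | none => spans
    | some s => spans ++ [(s, i - 1)]
  | b :: rest, i, start, spans =>
    if b == "." then
      goA rest (i + 1) (match start with | none => some i | some s => some s) spans
    else
      match start with
      | none => goA rest (i + 1) none spans
      | some s => goA rest (i + 1) none (spans ++ [(s, i - 1)])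

def find_free_spans (blocks : List String) : List (Int × Int) := goA blocks 0 none []

-- ===== PORT B =====
-- B's outer while-loop: take the head's key (free or not), scan the maximal run of blocks
-- with the same key (the inner while-loop, transcribed as takeWhile/dropWhile), emit a span
-- if the run is free, and continue after the run.
def goB : List String → Int → List (Int × Int)
  | [], _ => []
  | b :: rest, idx =>
    if b == "." then
      (idx, idx + 1 + ((rest.takeWhile (fun x => x == ".")).length : Int) - 1)
        :: goB (rest.dropWhile (fun x => x == ".")) (idx + 1 + ((rest.takeWhile (fun x => x == ".")).length : Int))
    else
      goB (rest.dropWhile (fun x => x != ".")) (idx + 1 + ((rest.takeWhile (fun x => x != ".")).length : Int))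
termination_by l _ => l.length
decreasing_by
  · exact Nat.lt_succ_of_le (rest.length_dropWhile_le _)
  · exact Nat.lt_succ_of_le (rest.length_dropWhile_le _)

def find_free_spans_alt (blocks : List String) : List (Int × Int) := goB blocks 0

-- ===== PRECONDITION & SPEC =====
def Spec_find_free_spans (blocks : List String) (out : List (Int × Int)) : Prop := out = find_free_spans_alt blocks
instance (blocks : List String) (out : List (Int × Int)) : Decidable (Spec_find_free_spans blocks out) := by unfold Spec_find_free_spans; infer_instance

-- ===== CLAIM (what is proved, stated in full; the proofs are below) =====
def Claim_equal_find_free_spans : Prop := ∀ (blocks : List String), Dom_find_free_spans blocks → Spec_find_free_spans blocks (find_free_spans blocks)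

-- ===== LEMMAS AND PROOFS =====

-- Skipping a (possibly empty) non-free prefix does not change goB's output.
lemma goB_skip (l : List String) (i : Int) :
    goB l i = goB (l.dropWhile (fun x => x != ".")) (i + ((l.takeWhile (fun x => x != ".")).length : Int)) := by
  cases l with
  | nil => simp
  | cons b rest =>
    by_cases hb : b == "."
    · have : (b != ".") = false := by simp_all
      simp [List.takeWhile_cons, List.dropWhile_cons, this]
    · have hb' : (b != ".") = true := by simp_all
      rw [goB]
      simp only [List.takeWhile_cons, List.dropWhile_cons, hb', if_neg (by simp_all : ¬ (b == ".") = true)]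
      simp
      ring_nf

lemma goA_goB (l : List String) :
    (∀ (i : Int) (spans : List (Int × Int)), goA l i none spans = spans ++ goB l i) ∧
    (∀ (i s : Int) (spans : List (Int × Int)),
      goA l i (some s) spans =
        spans ++ (s, i + ((l.takeWhile (fun x => x == ".")).length : Int) - 1)
          :: goB (l.dropWhile (fun x => x == ".")) (i + ((l.takeWhile (fun x => x == ".")).length : Int))) := by
  induction l with
  | nil =>
    constructor
    · intro i spans; simp [goA, goB]
    · intro i s spans; simp [goA, goB]
  | cons b rest ih =>
    obtain ⟨ih1, ih2⟩ := ih
    constructor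
    · intro i spans
      by_cases hb : b == "."
      · rw [goA, if_pos hb, goB, if_pos hb, ih2]
        try simp [List.takeWhile_cons, List.dropWhile_cons, hb]
        all_goals first | ring1 | (constructor <;> ring1) | exact ⟨trivial, trivial⟩ | trivial | ring_nf
        all_goals try simp
      · rw [goA, if_neg hb, goB, if_neg hb, ih1, goB_skip]
        all_goals try simp [List.takeWhile_cons, List.dropWhile_cons,
          (by simp_all : (b != ".") = true)]
        all_goals first | ring1 | trivial | ring_nf
        all_goals try simp
    · intro i s spans
      by_cases hb : b == "."
      · rw [goA, if_pos hb, ih2]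
        try simp [List.takeWhile_cons, List.dropWhile_cons, hb]
        all_goals first | ring1 | (constructor <;> ring1) | exact ⟨trivial, trivial⟩ | trivial | ring_nf
        all_goals try simp
      · rw [goA, if_neg hb, ih1]
        have e1 : goB (b :: rest) i = goB rest (i + 1) := by
          rw [goB, if_neg hb, goB_skip rest (i + 1)]
          try ring_nf
        try simp [List.takeWhile_cons, List.dropWhile_cons, hb, e1]

-- ===== VERDICT (by name: the statement is the Claim_ definition above) =====
theorem find_free_spans_spec : Claim_equal_find_free_spans := by
  intro blocks _
  unfold Spec_find_free_spans find_free_spans find_free_spans_alt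
  rw [(goA_goB blocks).1]
  simp
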